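-- pv_equiv track=rewrite | github.com/kmkirov/Monopoly-Standart- | gui main func.py | find_position_x_y
-- ===== SOURCE A (Python) =====
-- def find_position_x_y(position):
--     picx = go_player_picturex
--     picy = go_player_picturey
--     for a in range(position):
--         if picx > end_trip and picy >start_trip:
--
--             picx = picx - step_trip
--             picy = picy
--
--
--         elif picx <end_trip and picy >end_trip:
--
--             picx = picx
--             picy = picy - step_trip
--
--         elif picx < start_trip - magic_trip and picy <end_trip:
--             picx = picx + step_trip
--             picy = picy
--         else :
--             picx = picx
--             picy = picy + step_trip
--     return (picx,picy)
--
-- go_player_picturex = 497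
--
-- go_player_picturey = 501
--
-- start_trip = 500
--
-- end_trip = 50
--
-- step_trip = 46
--
-- magic_trip = 20 #bez popravkata ne e krasivo :)
-- ===== SOURCE B (Python) =====
-- go_player_picturex = 497
-- go_player_picturey = 501
-- start_trip = 500
-- end_trip = 50
-- step_trip = 46
-- magic_trip = 20
--
-- def find_position_x_y(position):
--     # O(1): the token walks a fixed 40-step perimeter cycle; index it by position mod 40.
--     i = max(position, 0) % 40
--     side, k = divmod(i, 10)
--     if side == 0:
--         return (go_player_picturex - step_trip * k, go_player_picturey)
--     if side == 1:
--         return (go_player_picturex - 10 * step_trip, go_player_picturey - step_trip * k)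
--     if side == 2:
--         return (go_player_picturex - 10 * step_trip + step_trip * k,
--                 go_player_picturey - 10 * step_trip)
--     return (go_player_picturex, go_player_picturey - 10 * step_trip + step_trip * k)
-- ===== Notes on version B (the rewrite author's own statement) =====
-- stated objective: faster
-- what changed: Replaced the step-by-step simulation of the token's walk with a closed-form lookup: the walk is a fixed 40-step perimeter cycle, so B computes side and offset from position mod 40 directly.
import Mathlib
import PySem

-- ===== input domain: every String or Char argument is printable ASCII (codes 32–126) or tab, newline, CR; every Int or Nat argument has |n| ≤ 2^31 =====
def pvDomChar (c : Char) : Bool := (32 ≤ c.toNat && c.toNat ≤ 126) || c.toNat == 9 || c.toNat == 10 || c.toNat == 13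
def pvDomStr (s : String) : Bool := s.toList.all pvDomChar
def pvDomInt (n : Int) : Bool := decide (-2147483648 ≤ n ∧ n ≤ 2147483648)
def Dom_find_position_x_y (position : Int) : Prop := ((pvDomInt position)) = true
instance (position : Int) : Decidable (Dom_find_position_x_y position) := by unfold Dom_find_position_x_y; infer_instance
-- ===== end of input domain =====

-- B replaces A's O(position)-step simulation by an O(1) closed-form lookup on the 40-step perimeter cycle.

-- ===== PORT A =====
-- one loop iteration of A's simulation (A's branch order, literally)
def pvStep (p : Int × Int) : Int × Int :=
  let picx := p.1
  let picy := p.2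
  if picx > 50 ∧ picy > 500 then (picx - 46, picy)
  else if picx < 50 ∧ picy > 50 then (picx, picy - 46)
  else if picx < 500 - 20 ∧ picy < 50 then (picx + 46, picy)
  else (picx, picy + 46)

def find_position_x_y (position : Int) : List Int :=
  let pic := (PySem.List.pyRange 0 position 1).foldl (fun p _ => pvStep p) (497, 501)
  [pic.1, pic.2]

-- ===== PORT B =====
-- B's closed form: side = i // 10, k = i % 10 select the point on the perimeter cycle
def pvCyclePoint (i : Int) : Int × Int :=
  let side := PySem.Int.floordiv i 10
  let k := PySem.Int.mod i 10
  if side = 0 then (497 - 46 * k, 501)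
  else if side = 1 then (497 - 10 * 46, 501 - 46 * k)
  else if side = 2 then (497 - 10 * 46 + 46 * k, 501 - 10 * 46)
  else (497, 501 - 10 * 46 + 46 * k)

def find_position_x_y_alt (position : Int) : List Int :=
  let i := PySem.Int.mod (max position 0) 40
  let p := pvCyclePoint i
  [p.1, p.2]

-- ===== PRECONDITION & SPEC =====
def Spec_find_position_x_y (position : Int) (out : List Int) : Prop := out = find_position_x_y_alt position
instance (position : Int) (out : List Int) : Decidable (Spec_find_position_x_y position out) := by unfold Spec_find_position_x_y; infer_instance

-- ===== CLAIM (what is proved, stated in full; the proofs are below) =====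
def Claim_equal_find_position_x_y : Prop := ∀ (position : Int), Dom_find_position_x_y position → Spec_find_position_x_y position (find_position_x_y position)

-- ===== LEMMAS AND PROOFS =====

theorem pv_foldl_const {α β : Type} (f : α → α) (l : List β) (init : α) :
    l.foldl (fun a _ => f a) init = f^[l.length] init := by
  induction l generalizing init with
  | nil => rfl
  | cons h t ih =>
      simp [List.foldl_cons, ih, Function.iterate_succ_apply]

-- one step of A advances B's cycle index by one (checked over all 40 residues)
theorem pv_step_cycle_fin : ∀ r : Fin 40, pvStep (pvCyclePoint (r : Int)) = pvCyclePoint (((r : Int) + 1) % 40) := by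
  decide

theorem pv_step_cycle (r : Int) (h0 : 0 ≤ r) (h1 : r < 40) :
    pvStep (pvCyclePoint r) = pvCyclePoint ((r + 1) % 40) := by
  have : r = ((⟨r.toNat, by omega⟩ : Fin 40) : Int) := by simp; omega
  rw [this]
  exact pv_step_cycle_fin _

theorem pv_iterate_cycle (n : ℕ) : pvStep^[n] (497, 501) = pvCyclePoint ((n : Int) % 40) := by
  induction n with
  | zero => decide
  | succ n ih =>
      rw [Function.iterate_succ_apply', ih,
        pv_step_cycle ((n : Int) % 40) (by omega) (by omega)]
      congr 1
      omega

-- ===== VERDICT (by name: the statement is the Claim_ definition above) =====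
theorem find_position_x_y_spec : Claim_equal_find_position_x_y := by
  intro position _
  unfold Spec_find_position_x_y find_position_x_y find_position_x_y_alt
  rw [pv_foldl_const, PySem.List.length_pyRange_one, pv_iterate_cycle]
  have hm : PySem.Int.mod (max position 0) 40 = ((position - 0).toNat : Int) % 40 := by
    rw [PySem.Int.mod_eq_emod_of_pos (by norm_num : (0:Int) < 40)]
    omega
  rw [hm]
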